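-- pv_equiv track=rewrite | github.com/krstevkoki/vestacka-inteligencija | aud3/molecule_problem.py | upAtomO
-- ===== SOURCE A (Python) =====
-- def upAtomO(state):
--     H1_i, H1_j, O_i, O_j, H2_i, H2_j = state
--     while 0 <= O_i <= 6 and 0 <= O_j <= 8 and \
--             (O_i, O_j) not in Prepreki and \
--             (O_i, O_j) not in ((H1_i, H1_j), (H2_i, H2_j)):
--         O_i -= 1
--         state = (H1_i, H1_j, O_i, O_j, H2_i, H2_j)
--
--     return state[2] + 1, state[3]
--
-- Prepreki = [
--     (5, 0), (3, 1), (5, 1), (1, 2), (0, 3), (5, 3), (4, 4),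
--     (0, 5), (3, 6), (4, 6), (5, 6), (0, 7), (3, 7), (1, 8)
-- ]
-- ===== SOURCE B (Python) =====
-- Prepreki = [
--     (5, 0), (3, 1), (5, 1), (1, 2), (0, 3), (5, 3), (4, 4),
--     (0, 5), (3, 6), (4, 6), (5, 6), (0, 7), (3, 7), (1, 8)
-- ]
--
--
-- def upAtomO(state):
--     H1_i, H1_j, O_i, O_j, H2_i, H2_j = state
--     if not (0 <= O_i <= 6 and 0 <= O_j <= 8):
--         return O_i + 1, O_j
--     blockers = [i for (i, j) in Prepreki if j == O_j]
--     if H1_j == O_j: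
--         blockers.append(H1_i)
--     if H2_j == O_j:
--         blockers.append(H2_i)
--     stop = max([r for r in blockers if 0 <= r <= O_i], default=-1)
--     return stop + 1, O_j
-- ===== Notes on version B (the rewrite author's own statement) =====
-- stated objective: alternative
-- what changed: Replaces the one-step-at-a-time decrement loop with a single max over the blocked rows (obstacles and hydrogens) in the oxygen's column at or below O_i, with -1 as the boundary default.
import Mathlib
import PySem

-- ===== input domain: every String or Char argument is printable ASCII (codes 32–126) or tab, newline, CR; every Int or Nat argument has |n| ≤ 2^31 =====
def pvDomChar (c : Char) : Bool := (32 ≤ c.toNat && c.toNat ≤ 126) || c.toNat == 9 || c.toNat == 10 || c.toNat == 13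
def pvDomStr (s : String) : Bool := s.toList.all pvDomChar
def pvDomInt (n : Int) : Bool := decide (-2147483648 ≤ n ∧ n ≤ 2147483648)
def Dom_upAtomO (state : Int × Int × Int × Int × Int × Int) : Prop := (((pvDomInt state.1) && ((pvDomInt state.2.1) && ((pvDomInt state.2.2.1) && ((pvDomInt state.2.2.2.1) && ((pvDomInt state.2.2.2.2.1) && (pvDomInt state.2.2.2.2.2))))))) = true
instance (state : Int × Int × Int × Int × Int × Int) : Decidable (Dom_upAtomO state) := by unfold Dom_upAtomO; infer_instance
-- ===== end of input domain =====

-- B replaces A's step-by-step decrement loop by one max over the column's blocked rows at or below O_i (alternative decomposition; no stepping loop).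

def prepreki : List (Int × Int) :=
  [(5, 0), (3, 1), (5, 1), (1, 2), (0, 3), (5, 3), (4, 4),
   (0, 5), (3, 6), (4, 6), (5, 6), (0, 7), (3, 7), (1, 8)]

-- ===== PORT A =====
-- the while loop: decrement O_i while in bounds and unblocked; returns the final O_i
def upAtomO_loop (H1i H1j Oj H2i H2j : Int) (Oi : Int) : Int :=
  if 0 ≤ Oi ∧ Oi ≤ 6 ∧ 0 ≤ Oj ∧ Oj ≤ 8 ∧
      (Oi, Oj) ∉ prepreki ∧ ¬((Oi, Oj) = (H1i, H1j) ∨ (Oi, Oj) = (H2i, H2j)) then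
    upAtomO_loop H1i H1j Oj H2i H2j (Oi - 1)
  else Oi
termination_by (Oi + 1).toNat
decreasing_by omega

def upAtomO (state : Int × Int × Int × Int × Int × Int) : Int × Int :=
  let (H1i, H1j, Oi, Oj, H2i, H2j) := state
  (upAtomO_loop H1i H1j Oj H2i H2j Oi + 1, Oj)

-- ===== PORT B =====
def upAtomO_alt (state : Int × Int × Int × Int × Int × Int) : Int × Int :=
  let (H1i, H1j, Oi, Oj, H2i, H2j) := state
  if ¬(0 ≤ Oi ∧ Oi ≤ 6 ∧ 0 ≤ Oj ∧ Oj ≤ 8) then (Oi + 1, Oj)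
  else
    let blockers := ((prepreki.filter (fun p => p.2 = Oj)).map Prod.fst)
      ++ (if H1j = Oj then [H1i] else []) ++ (if H2j = Oj then [H2i] else [])
    let stop := (blockers.filter (fun r => 0 ≤ r ∧ r ≤ Oi)).foldl max (-1)
    (stop + 1, Oj)

-- ===== PRECONDITION & SPEC =====
def Spec_upAtomO (state : Int × Int × Int × Int × Int × Int) (out : Int × Int) : Prop := out = upAtomO_alt state
instance (state : Int × Int × Int × Int × Int × Int) (out : Int × Int) : Decidable (Spec_upAtomO state out) := by unfold Spec_upAtomO; infer_instance

-- ===== CLAIM (what is proved, stated in full; the proofs are below) =====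
def Claim_equal_upAtomO : Prop := ∀ (state : Int × Int × Int × Int × Int × Int), Dom_upAtomO state → Spec_upAtomO state (upAtomO state)

-- ===== LEMMAS AND PROOFS =====

-- foldl max computes the maximum: if m bounds the list and is attained (or is the accumulator), foldl max a L = m
lemma foldl_max_eq (L : List Int) (a m : Int) (hm : m ∈ L ∨ m = a) (ha : a ≤ m)
    (hL : ∀ x ∈ L, x ≤ m) : L.foldl max a = m := by
  induction L generalizing a with
  | nil => exact (Or.resolve_left hm (List.not_mem_nil)).symm
  | cons x L ih =>
    simp only [List.foldl_cons]
    have hx := hL x (List.mem_cons_self ..)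
    have htail : ∀ y ∈ L, y ≤ m := fun y hy => hL y (List.mem_cons_of_mem _ hy)
    rcases hm with hm | hm
    · rcases List.mem_cons.mp hm with rfl | hmem
      · exact ih _ (Or.inr (max_eq_right ha).symm) (le_of_eq (max_eq_right ha)) htail
      · exact ih _ (Or.inl hmem) (max_le ha hx) htail
    · subst hm
      exact ih _ (Or.inr (max_eq_left hx).symm) (max_le le_rfl hx) htail

-- membership in B's blocker-row list = A's blocked-cell test
lemma mem_blockers (H1i H1j Oj H2i H2j r : Int) :
    r ∈ ((prepreki.filter (fun p => p.2 = Oj)).map Prod.fst)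
        ++ (if H1j = Oj then [H1i] else []) ++ (if H2j = Oj then [H2i] else []) ↔
    (r, Oj) ∈ prepreki ∨ (r, Oj) = (H1i, H1j) ∨ (r, Oj) = (H2i, H2j) := by
  simp only [List.mem_append, List.mem_map, List.mem_filter]
  constructor
  · rintro ((⟨⟨i, j⟩, ⟨hmem, hj⟩, rfl⟩ | h1) | h2)
    · exact Or.inl (by simpa [show j = Oj from by simpa using hj] using hmem)
    · split_ifs at h1 with h
      · simp at h1; subst h1 h; simp
      · simp at h1
    · split_ifs at h2 with h
      · simp at h2; subst h2 h; simp
      · simp at h2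
  · rintro (h | h | h)
    · exact Or.inl (Or.inl ⟨(r, Oj), ⟨h, by simp⟩, rfl⟩)
    · rw [Prod.mk.injEq] at h; obtain ⟨rfl, rfl⟩ := h; simp
    · rw [Prod.mk.injEq] at h; obtain ⟨rfl, rfl⟩ := h; simp

-- the loop's final row is the max blocked row at or below Oi (or -1)
lemma loop_eq_max (H1i H1j Oj H2i H2j : Int) (hOj : 0 ≤ Oj ∧ Oj ≤ 8) :
    ∀ Oi : Int, -1 ≤ Oi → Oi ≤ 6 →
    upAtomO_loop H1i H1j Oj H2i H2j Oi =
      ((((prepreki.filter (fun p => p.2 = Oj)).map Prod.fst)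
        ++ (if H1j = Oj then [H1i] else []) ++ (if H2j = Oj then [H2i] else [])).filter
          (fun r => 0 ≤ r ∧ r ≤ Oi)).foldl max (-1) := by
  intro Oi hge
  induction Oi, hge using Int.le_induction with
  | base =>
    intro _
    rw [upAtomO_loop]
    rw [if_neg (by omega)]
    have : ((((prepreki.filter (fun p => p.2 = Oj)).map Prod.fst)
        ++ (if H1j = Oj then [H1i] else []) ++ (if H2j = Oj then [H2i] else [])).filter
          (fun r => 0 ≤ r ∧ r ≤ (-1 : Int))) = [] := by
      apply List.filter_eq_nil_iff.mpr
      intro x _; simp; omega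
    rw [this]; rfl
  | succ Oi hb ih =>
    intro h6
    set L := (((prepreki.filter (fun p => p.2 = Oj)).map Prod.fst)
        ++ (if H1j = Oj then [H1i] else []) ++ (if H2j = Oj then [H2i] else [])) with hL
    rw [upAtomO_loop]
    by_cases hblk : (Oi + 1, Oj) ∈ prepreki ∨ (Oi + 1, Oj) = (H1i, H1j) ∨ (Oi + 1, Oj) = (H2i, H2j)
    · rw [if_neg (by tauto)]
      refine (foldl_max_eq _ _ _ ?_ (by omega) ?_).symm
      · exact Or.inl (List.mem_filter.mpr ⟨(mem_blockers ..).mpr hblk, by simp; omega⟩)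
      · intro x hx
        have := (List.mem_filter.mp hx).2
        simp at this; omega
    · rw [if_pos (by constructor; omega; constructor; omega; exact ⟨hOj.1, hOj.2, by tauto, by tauto⟩)]
      have hsame : L.filter (fun r => 0 ≤ r ∧ r ≤ Oi + 1) = L.filter (fun r => 0 ≤ r ∧ r ≤ Oi) := by
        apply List.filter_congr
        intro x hx
        by_cases hxe : x = Oi + 1
        · exact absurd ((mem_blockers ..).mp (hxe ▸ hx)) hblk
        · simp only [decide_eq_decide]; omega
      rw [hsame, show Oi + 1 - 1 = Oi from by omega]
      exact ih (by omega)

-- ===== VERDICT (by name: the statement is the Claim_ definition above) =====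
theorem upAtomO_spec : Claim_equal_upAtomO := by
  intro state _
  obtain ⟨H1i, H1j, Oi, Oj, H2i, H2j⟩ := state
  show _ = upAtomO_alt _
  unfold upAtomO upAtomO_alt
  by_cases h : 0 ≤ Oi ∧ Oi ≤ 6 ∧ 0 ≤ Oj ∧ Oj ≤ 8
  · simp only [if_neg (not_not_intro h)]
    have := loop_eq_max H1i H1j Oj H2i H2j ⟨h.2.2.1, h.2.2.2⟩ Oi (by omega) h.2.1
    simp only [this]
  · simp only [if_pos h]
    rw [upAtomO_loop, if_neg (by tauto)]
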